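-- pv_equiv track=rewrite | github.com/Stockoh/My-python-code | essai.py | trouvenumtheo
-- ===== SOURCE A (Python) =====
-- def trouvenumtheo(n):
--     L=[]
--     a=1
--     while True:
--         t=0
--         for i in range(a):
--             t+=i
--         r=a
--         t2=0
--         while True:
--             t2+=r
--             if t==t2:L.append([t,a-1,r])
--             elif t2>t:break
--             r+=1
--         if t>=n: break
--         a+=1
--     return L
-- ===== SOURCE B (Python) =====
-- def trouvenumtheo(n):
--     # Closed form: t = a*(a-1)//2; the inner search of A succeeds exactly for the
--     # r >= a with r*(r+1) == 2*a*(a-1); find it by binary search on [a, 2*a].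
--     L = []
--     a = 1
--     while True:
--         t = a * (a - 1) // 2
--         target = 2 * a * (a - 1)
--         lo, hi = a, 2 * a
--         while lo < hi:
--             mid = (lo + hi) // 2
--             if mid * (mid + 1) < target:
--                 lo = mid + 1
--             else:
--                 hi = mid
--         if lo * (lo + 1) == target:
--             L.append([t, a - 1, lo])
--         if t >= n:
--             break
--         a += 1
--     return L
-- ===== Notes on version B (the rewrite author's own statement) =====
-- stated objective: faster
-- what changed: Replaces A's re-summation of range(a) and linear consecutive-sum scan per a by the closed form t=a(a-1)//2 and a binary search for the unique r>=a with r(r+1)=2a(a-1).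
import Mathlib
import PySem

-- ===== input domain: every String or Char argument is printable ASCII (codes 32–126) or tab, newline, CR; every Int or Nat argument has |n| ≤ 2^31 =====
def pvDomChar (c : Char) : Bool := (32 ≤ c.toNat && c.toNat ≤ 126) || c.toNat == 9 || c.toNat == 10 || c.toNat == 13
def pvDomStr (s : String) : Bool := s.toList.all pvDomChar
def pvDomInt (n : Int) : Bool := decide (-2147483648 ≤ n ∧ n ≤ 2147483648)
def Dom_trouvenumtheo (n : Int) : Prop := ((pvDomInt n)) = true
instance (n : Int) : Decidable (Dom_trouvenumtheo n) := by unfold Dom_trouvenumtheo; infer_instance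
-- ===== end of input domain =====

-- B replaces A's per-a re-summation and linear consecutive-sum scan by the closed form
-- t = a*(a-1)//2 and a binary search for the r ≥ a with r*(r+1) = 2*a*(a-1)  (objective: faster).

-- ===== PORT A =====
-- inner 'while True: t2+=r; if t==t2: append; elif t2>t: break; r+=1'
-- (hr is a proof argument carrying the loop invariant 1 ≤ r, needed for termination)
def pvInnerA (t a r t2 : Int) (L : List (List Int)) (hr : 1 ≤ r) : List (List Int) :=
  if t = t2 + r then pvInnerA t a (r + 1) (t2 + r) (L ++ [[t, a - 1, r]]) (by omega)
  else if t2 + r > t then L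
  else pvInnerA t a (r + 1) (t2 + r) L (by omega)
termination_by (t - t2).toNat
decreasing_by all_goals omega

-- 't=0; for i in range(a): t+=i'
def pvSumRange (a : Int) : Int := (PySem.List.pyRange 0 a 1).foldl (fun t i => t + i) 0

theorem pvSumRange_closed : ∀ a : Int, 0 ≤ a → 2 * pvSumRange a = a * (a - 1) := by
  intro a ha
  induction a, ha using Int.le_induction with
  | base => decide
  | succ a ha ih =>
      unfold pvSumRange at *
      rw [PySem.List.pyRange_one_succ_right ha, List.foldl_append]
      simp only [List.foldl]
      ring_nf
      ring_nf at ih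
      omega

-- outer 'while True' loop of A; ha carries the invariant 1 ≤ a (A starts at a = 1)
def pvOuterA (n a : Int) (L : List (List Int)) (ha : 1 ≤ a) : List (List Int) :=
  let t := pvSumRange a
  let L' := pvInnerA t a a 0 L ha
  if t ≥ n then L' else pvOuterA n (a + 1) L' (by omega)
termination_by (2 * n - a * (a - 1)).toNat
decreasing_by
  have h2 := pvSumRange_closed a (by omega)
  have h4 : (a + 1) * (a + 1 - 1) = a * (a - 1) + 2 * a := by ring
  omega

def trouvenumtheo (n : Int) : List (List Int) := pvOuterA n 1 [] (by omega)

-- ===== PORT B =====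
-- 'while lo < hi: mid=(lo+hi)//2; if mid*(mid+1) < target: lo=mid+1 else: hi=mid'
-- (hlo is a proof argument carrying the invariant 1 ≤ lo, for the termination argument)
def pvBin (target lo hi : Int) (hlo : 1 ≤ lo) : Int :=
  if h : lo < hi then
    if (PySem.Int.floordiv (lo + hi) 2) * ((PySem.Int.floordiv (lo + hi) 2) + 1) < target then
      pvBin target ((PySem.Int.floordiv (lo + hi) 2) + 1) hi
        (by have := (PySem.Int.floordiv_two_mid_bounds (le_of_lt h)).1; omega)
    else pvBin target lo (PySem.Int.floordiv (lo + hi) 2) hlo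
  else lo
termination_by (hi - lo).toNat
decreasing_by
  · have h1 := (PySem.Int.floordiv_two_mid_bounds (le_of_lt h)).1
    omega
  · have h1 := (PySem.Int.floordiv_two_mid_bounds (le_of_lt h)).1
    have h2 : PySem.Int.floordiv (lo + hi) 2 < hi := by
      rw [PySem.Int.floordiv_eq_ediv_of_pos (by omega)]; omega
    omega

-- outer loop of B
def pvOuterB (n a : Int) (L : List (List Int)) (ha : 1 ≤ a) : List (List Int) :=
  let t := PySem.Int.floordiv (a * (a - 1)) 2
  let target := 2 * a * (a - 1)
  let lo := pvBin target a (2 * a) ha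
  let L' := if lo * (lo + 1) = target then L ++ [[t, a - 1, lo]] else L
  if t ≥ n then L' else pvOuterB n (a + 1) L' (by omega)
termination_by (2 * n - a * (a - 1)).toNat
decreasing_by
  have h2 : PySem.Int.floordiv (a * (a - 1)) 2 = (a * (a - 1)) / 2 :=
    PySem.Int.floordiv_eq_ediv_of_pos (by omega)
  have h3 : a * (a - 1) = 2 * (a * (a - 1) / 2) := by
    have : (2 : Int) ∣ a * (a - 1) := Int.even_mul_pred_self a |>.two_dvd
    omega
  have h4 : (a + 1) * (a + 1 - 1) = a * (a - 1) + 2 * a := by ring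
  omega

def trouvenumtheo_alt (n : Int) : List (List Int) := pvOuterB n 1 [] (by omega)

-- ===== PRECONDITION & SPEC =====
def Spec_trouvenumtheo (n : Int) (out : List (List Int)) : Prop := out = trouvenumtheo_alt n
instance (n : Int) (out : List (List Int)) : Decidable (Spec_trouvenumtheo n out) := by unfold Spec_trouvenumtheo; infer_instance

-- ===== CLAIM (what is proved, stated in full; the proofs are below) =====
def Claim_equal_trouvenumtheo : Prop := ∀ (n : Int), Dom_trouvenumtheo n → Spec_trouvenumtheo n (trouvenumtheo n)

-- ===== LEMMAS AND PROOFS =====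

-- strict monotonicity of x ↦ x*(x+1) on nonnegative integers
theorem pvMono {x y : Int} (hx : 0 ≤ x) (hxy : x < y) : x * (x + 1) < y * (y + 1) := by
  nlinarith

-- A's inner loop, hit case: the unique ρ ≥ r with ρ(ρ+1) = 2(t-t2)+(r-1)r is appended
theorem pvInnerA_hit : ∀ (k : Nat) (t a r t2 ρ : Int) (L : List (List Int)) (hr : 1 ≤ r),
    (ρ - r).toNat = k → r ≤ ρ → 2 * t2 + (ρ * (ρ + 1) - (r - 1) * r) = 2 * t →
    pvInnerA t a r t2 L hr = L ++ [[t, a - 1, ρ]] := by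
  intro k
  induction k with
  | zero =>
      intro t a r t2 ρ L hr hk hρ heq
      have hρr : ρ = r := by omega
      subst hρr
      have he : ρ * (ρ + 1) - (ρ - 1) * ρ = 2 * ρ := by ring
      have h1 : t = t2 + ρ := by omega
      rw [pvInnerA, if_pos h1, pvInnerA, if_neg (by omega), if_pos (by omega)]
  | succ k ih =>
      intro t a r t2 ρ L hr hk hρ heq
      have hrρ : r + 1 ≤ ρ := by omega
      have hlt : r * (r + 1) < ρ * (ρ + 1) := pvMono (by omega) (by omega)
      have he : r * (r + 1) - (r - 1) * r = 2 * r := by ring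
      have h1 : t2 + r < t := by omega
      rw [pvInnerA, if_neg (by omega), if_neg (by omega)]
      apply ih
      · omega
      · omega
      · have : ρ * (ρ + 1) - (r + 1 - 1) * (r + 1) =
            (ρ * (ρ + 1) - (r - 1) * r) - 2 * r := by ring
        omega

-- A's inner loop, miss case: no ρ ≥ r solves it, nothing is appended
theorem pvInnerA_miss : ∀ (k : Nat) (t a r t2 : Int) (L : List (List Int)) (hr : 1 ≤ r),
    (t - t2).toNat = k →
    (∀ ρ : Int, r ≤ ρ → 2 * t2 + (ρ * (ρ + 1) - (r - 1) * r) ≠ 2 * t) →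
    pvInnerA t a r t2 L hr = L := by
  intro k
  induction k using Nat.strong_induction_on with
  | _ k ih =>
      intro t a r t2 L hr hk hm
      have he : r * (r + 1) - (r - 1) * r = 2 * r := by ring
      have hne : t ≠ t2 + r := by
        intro h; exact hm r le_rfl (by omega)
      rw [pvInnerA, if_neg hne]
      by_cases hgt : t2 + r > t
      · rw [if_pos hgt]
      · rw [if_neg hgt]
        apply ih (t - (t2 + r)).toNat (by omega)
        · omega
        · intro ρ hρ
          have : ρ * (ρ + 1) - (r + 1 - 1) * (r + 1) =
              (ρ * (ρ + 1) - (r - 1) * r) - 2 * r := by ring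
          have := hm ρ (by omega)
          omega

-- binary search finds the solution when it exists in [lo, hi]
theorem pvBin_hit : ∀ (k : Nat) (target lo hi ρ : Int) (hlo : 1 ≤ lo),
    (hi - lo).toNat = k → lo ≤ ρ → ρ ≤ hi → ρ * (ρ + 1) = target →
    pvBin target lo hi hlo = ρ := by
  intro k
  induction k using Nat.strong_induction_on with
  | _ k ih =>
      intro target lo hi ρ hlo hk h1 h2 heq
      rw [pvBin]
      by_cases h : lo < hi
      · rw [dif_pos h]
        have hmid := PySem.Int.floordiv_two_mid_bounds (le_of_lt h)
        have hmhi : PySem.Int.floordiv (lo + hi) 2 < hi := by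
          rw [PySem.Int.floordiv_eq_ediv_of_pos (by omega)]; omega
        by_cases hc : (PySem.Int.floordiv (lo + hi) 2) * ((PySem.Int.floordiv (lo + hi) 2) + 1) < target
        · rw [if_pos hc]
          have hρm : PySem.Int.floordiv (lo + hi) 2 < ρ := by
            by_contra hcon
            push_neg at hcon
            rcases lt_or_eq_of_le hcon with hlt | hEq
            · have := pvMono (show (0:Int) ≤ ρ by omega) hlt
              omega
            · rw [hEq] at heq
              omega
          exact ih (hi - (PySem.Int.floordiv (lo + hi) 2 + 1)).toNat (by omega) _ _ _ _ _
            rfl (by omega) h2 heq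
        · rw [if_neg hc]
          have hρm : ρ ≤ PySem.Int.floordiv (lo + hi) 2 := by
            by_contra hcon
            push_neg at hcon
            have := pvMono (show (0:Int) ≤ PySem.Int.floordiv (lo + hi) 2 by omega) hcon
            omega
          exact ih (PySem.Int.floordiv (lo + hi) 2 - lo).toNat (by omega) _ _ _ _ _
            rfl h1 hρm heq
      · rw [dif_neg h]
        omega

-- binary search returns a value in [lo, hi]
theorem pvBin_range : ∀ (k : Nat) (target lo hi : Int) (hlo : 1 ≤ lo),
    (hi - lo).toNat = k → lo ≤ hi →
    lo ≤ pvBin target lo hi hlo ∧ pvBin target lo hi hlo ≤ hi := by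
  intro k
  induction k using Nat.strong_induction_on with
  | _ k ih =>
    intro target lo hi hlo hk hle
    rw [pvBin]
    by_cases h : lo < hi
    · rw [dif_pos h]
      have hmid := PySem.Int.floordiv_two_mid_bounds (le_of_lt h)
      have hmhi : PySem.Int.floordiv (lo + hi) 2 < hi := by
        rw [PySem.Int.floordiv_eq_ediv_of_pos (by omega)]; omega
      by_cases hc : (PySem.Int.floordiv (lo + hi) 2) * ((PySem.Int.floordiv (lo + hi) 2) + 1) < target
      · rw [if_pos hc]
        have := ih (hi - (PySem.Int.floordiv (lo + hi) 2 + 1)).toNat (by omega)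
          target (PySem.Int.floordiv (lo + hi) 2 + 1) hi (by omega) rfl (by omega)
        omega
      · rw [if_neg hc]
        have := ih (PySem.Int.floordiv (lo + hi) 2 - lo).toNat (by omega)
          target lo (PySem.Int.floordiv (lo + hi) 2) hlo rfl (by omega)
        omega
    · rw [dif_neg h]
      omega

-- one outer step: A's inner scan = B's binary-search check (t = a(a-1)/2)
theorem pvStep (t a : Int) (L : List (List Int)) (ha : 1 ≤ a) (ht : 2 * t = a * (a - 1)) :
    pvInnerA t a a 0 L ha =
      (if (pvBin (2 * a * (a - 1)) a (2 * a) ha) * ((pvBin (2 * a * (a - 1)) a (2 * a) ha) + 1)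
          = 2 * a * (a - 1)
       then L ++ [[t, a - 1, pvBin (2 * a * (a - 1)) a (2 * a) ha]] else L) := by
  by_cases hex : ∃ ρ : Int, a ≤ ρ ∧ ρ * (ρ + 1) = 2 * a * (a - 1)
  · obtain ⟨ρ, hρ1, hρ2⟩ := hex
    have hρhi : ρ ≤ 2 * a := by
      by_contra hcon
      push_neg at hcon
      have := pvMono (show (0:Int) ≤ 2 * a by omega) hcon
      nlinarith
    have hbin : pvBin (2 * a * (a - 1)) a (2 * a) ha = ρ :=
      pvBin_hit _ _ _ _ _ _ rfl hρ1 hρhi hρ2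
    rw [hbin, if_pos hρ2]
    apply pvInnerA_hit (ρ - a).toNat _ _ _ _ _ _ _ rfl hρ1
    nlinarith
  · push_neg at hex
    have hrange := pvBin_range _ (2 * a * (a - 1)) a (2 * a) ha rfl (by omega)
    have hne : (pvBin (2 * a * (a - 1)) a (2 * a) ha) * ((pvBin (2 * a * (a - 1)) a (2 * a) ha) + 1)
        ≠ 2 * a * (a - 1) := hex _ hrange.1
    rw [if_neg hne]
    apply pvInnerA_miss (t - 0).toNat _ _ _ _ _ _ rfl
    intro ρ hρ hc
    exact hex ρ hρ (by nlinarith)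

-- the two outer loops agree step by step
theorem pvOuter_eq : ∀ (k : Nat) (n a : Int) (L : List (List Int)) (ha : 1 ≤ a),
    (2 * n - a * (a - 1)).toNat = k → pvOuterA n a L ha = pvOuterB n a L ha := by
  intro k
  induction k using Nat.strong_induction_on with
  | _ k ih =>
    intro n a L ha hk
    have hsum := pvSumRange_closed a (by omega)
    have heven : (2 : Int) ∣ a * (a - 1) := Int.even_mul_pred_self a |>.two_dvd
    have hfd : PySem.Int.floordiv (a * (a - 1)) 2 = pvSumRange a := by
      rw [PySem.Int.floordiv_eq_ediv_of_pos (by omega)]; omega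
    rw [pvOuterA, pvOuterB]
    simp only [hfd]
    rw [pvStep (pvSumRange a) a L ha hsum]
    by_cases hb : pvSumRange a ≥ n
    · simp only [if_pos hb]
    · simp only [if_neg hb]
      have h4 : (a + 1) * (a + 1 - 1) = a * (a - 1) + 2 * a := by ring
      exact ih (2 * n - (a + 1) * (a + 1 - 1)).toNat (by omega) n (a + 1) _ (by omega) rfl

-- ===== VERDICT (by name: the statement is the Claim_ definition above) =====
theorem trouvenumtheo_spec : Claim_equal_trouvenumtheo := by
  intro n _
  unfold Spec_trouvenumtheo trouvenumtheo trouvenumtheo_alt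
  exact pvOuter_eq _ n 1 [] (by omega) rfl
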